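-- pv_equiv track=rewrite | github.com/ramrajsingh10/tender-automation | services/rag-indexer/chunker.py | _collect_blocks_in_range
-- ===== SOURCE A (Python) =====
-- from typing import Any, Iterable, List
--
-- def _collect_blocks_in_range(anchor_blocks: dict[int, list[dict[str, Any]]], start_page: int, end_page: int) -> list[str]:
--     texts: list[str] = []
--     for page_number in range(start_page, end_page + 1):
--         for block in anchor_blocks.get(page_number, []):
--             text = block.get("text")
--             if text:
--                 texts.append(text)
--     return texts
-- ===== SOURCE B (Python) =====
-- def _collect_blocks_in_range(anchor_blocks, start_page, end_page):
--     pages = sorted(k for k in anchor_blocks if start_page <= k <= end_page)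
--     return [t for p in pages for b in anchor_blocks[p] if (t := b.get("text"))]
-- ===== Notes on version B (the rewrite author's own statement) =====
-- stated objective: alternative
-- what changed: Instead of scanning every integer in range(start_page, end_page+1) with a dict lookup each and an appending loop, B sorts only the dict keys inside the range and builds the result as a single comprehension, so cost no longer depends on the width of the range (not measurably faster on the generated inputs).
import Mathlib
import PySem

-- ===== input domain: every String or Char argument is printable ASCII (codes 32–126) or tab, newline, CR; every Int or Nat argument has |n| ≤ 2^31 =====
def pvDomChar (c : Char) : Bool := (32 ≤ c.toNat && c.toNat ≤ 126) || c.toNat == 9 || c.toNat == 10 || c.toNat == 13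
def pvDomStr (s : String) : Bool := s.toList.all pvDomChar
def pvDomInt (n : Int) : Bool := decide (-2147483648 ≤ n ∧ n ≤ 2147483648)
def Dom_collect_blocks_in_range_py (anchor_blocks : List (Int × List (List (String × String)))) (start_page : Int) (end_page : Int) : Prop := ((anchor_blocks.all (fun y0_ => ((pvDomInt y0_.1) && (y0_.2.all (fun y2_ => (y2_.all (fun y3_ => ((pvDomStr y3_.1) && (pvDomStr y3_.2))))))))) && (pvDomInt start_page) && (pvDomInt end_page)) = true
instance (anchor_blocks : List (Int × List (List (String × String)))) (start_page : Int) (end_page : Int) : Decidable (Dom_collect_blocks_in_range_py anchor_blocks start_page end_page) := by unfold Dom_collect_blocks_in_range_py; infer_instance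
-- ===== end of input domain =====

-- B replaces A's scan over every integer of range(start_page, end_page+1) (a dict lookup plus an
-- appending inner loop per integer) by sorting only the dict keys inside the range and producing
-- the result as one flat comprehension (objective: alternative algorithm, range-width independent).

-- ===== PORT A =====
-- inner loop of A:  for block in ...: text = block.get("text"); if text: texts.append(text)
def pvTexts (blocks : List (List (String × String))) (acc : List String) : List String :=
  blocks.foldl (fun texts block =>
    match (block.find? (fun kv => kv.1 == "text")).map (·.2) with
    | some text => if text = "" then texts else texts ++ [text]
    | none => texts) acc

-- anchor_blocks.get(page_number, []) — dict lookup = first match in the association list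
def pvPageBlocks (anchor_blocks : List (Int × List (List (String × String)))) (k : Int) :
    List (List (String × String)) :=
  ((anchor_blocks.find? (fun p => p.1 == k)).map (·.2)).getD []

def collect_blocks_in_range_py (anchor_blocks : List (Int × List (List (String × String)))) (start_page : Int) (end_page : Int) : List String :=
  (PySem.List.pyRange start_page (end_page + 1) 1).foldl
    (fun texts page_number => pvTexts (pvPageBlocks anchor_blocks page_number) texts) []

-- ===== PORT B =====
-- (t := b.get("text")) used as filter-and-value: a block yields its "text" value iff present and non-empty
def pvGrab (block : List (String × String)) : Option String :=
  (block.find? (fun kv => kv.1 == "text")).bind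
    (fun kv => if kv.2 = "" then none else some kv.2)

def collect_blocks_in_range_py_alt (anchor_blocks : List (Int × List (List (String × String)))) (start_page : Int) (end_page : Int) : List String :=
  -- pages = sorted(k for k in anchor_blocks if start_page <= k <= end_page):
  -- dict-key iteration = distinct keys in insertion order, filtered, then sorted ascending
  let pages := PySem.List.sorted
      ((PySem.List.dedup (anchor_blocks.map (·.1))).filter
        (fun k => decide (start_page ≤ k) && decide (k ≤ end_page)))
      (fun x => x) false
  -- [t for p in pages for b in anchor_blocks[p] if (t := b.get("text"))]
  pages.flatMap (fun p =>
    (((anchor_blocks.find? (fun q => q.1 == p)).map (·.2)).getD []).filterMap pvGrab)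

-- ===== PRECONDITION & SPEC =====
def Spec_collect_blocks_in_range_py (anchor_blocks : List (Int × List (List (String × String)))) (start_page : Int) (end_page : Int) (out : List String) : Prop := out = collect_blocks_in_range_py_alt anchor_blocks start_page end_page
instance (anchor_blocks : List (Int × List (List (String × String)))) (start_page : Int) (end_page : Int) (out : List String) : Decidable (Spec_collect_blocks_in_range_py anchor_blocks start_page end_page out) := by unfold Spec_collect_blocks_in_range_py; infer_instance

-- ===== CLAIM (what is proved, stated in full; the proofs are below) =====
def Claim_equal_collect_blocks_in_range_py : Prop := ∀ (anchor_blocks : List (Int × List (List (String × String)))) (start_page : Int) (end_page : Int), Dom_collect_blocks_in_range_py anchor_blocks start_page end_page → Spec_collect_blocks_in_range_py anchor_blocks start_page end_page (collect_blocks_in_range_py anchor_blocks start_page end_page)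

-- ===== LEMMAS AND PROOFS =====

-- A's inner loop appends exactly the pvGrab values of the blocks
theorem pvTexts_eq (blocks : List (List (String × String))) (acc : List String) :
    pvTexts blocks acc = acc ++ blocks.filterMap pvGrab := by
  unfold pvTexts
  rw [PySem.List.foldl_congr_mem (g := fun texts b => texts ++ (pvGrab b).toList)]
  · rw [PySem.List.foldl_append_eq_flatMap, List.filterMap_eq_flatMap_toList]
  · intro texts b _
    simp only [pvGrab]
    cases h : b.find? (fun kv => kv.1 == "text") with
    | none => simp
    | some kv => by_cases hkv : kv.2 = "" <;> simp [hkv]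

-- A's outer fold is the flatMap of per-page contributions
theorem foldl_pvTexts_eq_flatMap (anchor_blocks : List (Int × List (List (String × String))))
    (ps : List Int) :
    ps.foldl (fun texts p => pvTexts (pvPageBlocks anchor_blocks p) texts) []
      = ps.flatMap (fun p => (pvPageBlocks anchor_blocks p).filterMap pvGrab) := by
  rw [PySem.List.foldl_congr_mem
        (g := fun texts p => texts ++ (pvPageBlocks anchor_blocks p).filterMap pvGrab)]
  · rw [PySem.List.foldl_append_eq_flatMap]; rfl
  · intro texts p _
    exact pvTexts_eq _ _

-- a page that is not a key contributes nothing
theorem pvPageBlocks_of_not_key (anchor_blocks : List (Int × List (List (String × String))))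
    (p : Int) (hp : p ∉ anchor_blocks.map (·.1)) :
    pvPageBlocks anchor_blocks p = [] := by
  have : anchor_blocks.find? (fun q => q.1 == p) = none := by
    rw [List.find?_eq_none]
    intro x hx
    simp only [beq_iff_eq]
    intro h
    exact hp (List.mem_map.mpr ⟨x, hx, h⟩)
  simp [pvPageBlocks, this]

-- B's sorted filtered key list IS A's range filtered to the keys
theorem sorted_keys_eq_range_filter (anchor_blocks : List (Int × List (List (String × String))))
    (start_page end_page : Int) :
    PySem.List.sorted
      ((PySem.List.dedup (anchor_blocks.map (·.1))).filter
        (fun k => decide (start_page ≤ k) && decide (k ≤ end_page)))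
      (fun x => x) false
    = (PySem.List.pyRange start_page (end_page + 1) 1).filter
        (fun p => decide (p ∈ anchor_blocks.map (·.1))) := by
  apply PySem.List.sorted_eq_of_perm_of_pairwise_lt
  · apply (List.perm_ext_iff_of_nodup ?_ ?_).mpr
    · intro a
      simp only [List.mem_filter, PySem.List.mem_pyRange_one, PySem.List.mem_dedup,
        Bool.and_eq_true, decide_eq_true_eq]
      constructor
      · rintro ⟨⟨h2, h3⟩, h1⟩
        exact ⟨h1, h2, by omega⟩
      · rintro ⟨h1, h2, h3⟩
        exact ⟨⟨h2, by omega⟩, h1⟩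
    · exact (PySem.List.nodup_pyRange_one _ _).filter _
    · exact (PySem.List.nodup_dedup _).filter _
  · exact (PySem.List.pairwise_lt_pyRange_one _ _).filter _

-- ===== VERDICT (by name: the statement is the Claim_ definition above) =====
theorem collect_blocks_in_range_py_spec : Claim_equal_collect_blocks_in_range_py := by
  intro anchor_blocks start_page end_page _
  unfold Spec_collect_blocks_in_range_py collect_blocks_in_range_py collect_blocks_in_range_py_alt
  rw [foldl_pvTexts_eq_flatMap, sorted_keys_eq_range_filter]
  show _ = List.flatMap (fun p => (pvPageBlocks anchor_blocks p).filterMap pvGrab) _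
  induction PySem.List.pyRange start_page (end_page + 1) 1 with
  | nil => rfl
  | cons p ps ih =>
    by_cases hp : p ∈ anchor_blocks.map (·.1)
    · simp [hp, ih]
    · simp [hp, ih, pvPageBlocks_of_not_key anchor_blocks p hp]
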